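-- pv_equiv track=rewrite | github.com/UyumazHakan/LLVM_VERYSIMPLECPU | cleaner.py | skip_header
-- ===== SOURCE A (Python) =====
-- def skip_header(lines):
--     new_lines = []
--     flag = False
--     for line in lines:
--         if flag:
--             new_lines.append(line)
--         if not flag and line[0] == '0':
--             flag = True
--     return new_lines
-- ===== SOURCE B (Python) =====
-- def skip_header(lines):
--     for i, line in enumerate(lines):
--         if line[0] == '0':
--             return list(lines[i+1:])
--     return []
-- ===== Notes on version B (the rewrite author's own statement) =====
-- stated objective: simpler
-- what changed: Replaces the flag-and-accumulator loop with an early-return scan for the first line whose first character is '0', returning a bulk slice of the remaining lines.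
import Mathlib
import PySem

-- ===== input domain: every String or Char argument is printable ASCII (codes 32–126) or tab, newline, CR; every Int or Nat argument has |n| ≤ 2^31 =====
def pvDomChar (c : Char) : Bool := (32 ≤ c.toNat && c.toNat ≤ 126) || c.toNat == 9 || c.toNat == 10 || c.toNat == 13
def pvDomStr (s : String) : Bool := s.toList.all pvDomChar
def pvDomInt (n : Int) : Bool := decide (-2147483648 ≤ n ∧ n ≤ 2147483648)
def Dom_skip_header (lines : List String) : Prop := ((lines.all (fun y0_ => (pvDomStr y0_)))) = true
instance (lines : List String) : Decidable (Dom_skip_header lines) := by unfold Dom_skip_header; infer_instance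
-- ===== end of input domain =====

-- B replaces A's flag-and-accumulator loop by an early-return scan that yields the
-- remaining suffix in bulk (objective: simpler). Return-value equivalence only.

-- ===== PORT A =====
def skipStep (st : List String × Bool) (line : String) : List String × Bool :=
  let nl := if st.2 then st.1 ++ [line] else st.1
  let fl := if (!st.2) && (PySem.Str.pyGet? line 0 == some '0') then true else st.2
  (nl, fl)

def skip_header (lines : List String) : List String :=
  (lines.foldl skipStep ([], false)).1

-- ===== PORT B =====
def skip_header_alt : List String → List String
  | [] => []
  | l :: rest => if PySem.Str.pyGet? l 0 == some '0' then rest else skip_header_alt rest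

-- ===== PRECONDITION & SPEC =====
-- Pre_ excludes exactly the inputs on which Python A raises IndexError (line[0] on an
-- empty line reached while the flag is still False); B raises there as well.
def Pre_skip_header (lines : List String) : Prop :=
  ∀ i ∈ List.range lines.length, lines.getD i "" = "" →
    ∃ j ∈ List.range i, PySem.Str.pyGet? (lines.getD j "") 0 = some '0'
instance (lines : List String) : Decidable (Pre_skip_header lines) := by
  unfold Pre_skip_header; infer_instance

def pvWitness_skip_header : List String := ["abc", "0x", "y", ""]

def Spec_skip_header (lines : List String) (out : List String) : Prop := out = skip_header_alt lines
instance (lines : List String) (out : List String) : Decidable (Spec_skip_header lines out) := by unfold Spec_skip_header; infer_instance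

-- ===== CLAIM (what is proved, stated in full; the proofs are below) =====
def Claim_equal_skip_header : Prop := ∀ (lines : List String), Dom_skip_header lines → Pre_skip_header lines → Spec_skip_header lines (skip_header lines)

-- ===== LEMMAS AND PROOFS =====
-- once the flag is set, A's loop appends every remaining line
theorem foldl_skipStep_true (rest : List String) :
    ∀ acc : List String, rest.foldl skipStep (acc, true) = (acc ++ rest, true) := by
  induction rest with
  | nil => intro acc; simp
  | cons l rest ih =>
    intro acc
    simp only [List.foldl_cons, skipStep]
    simpa using ih (acc ++ [l])

theorem foldl_skipStep_false (lines : List String) :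
    ∀ acc : List String,
      (lines.foldl skipStep (acc, false)).1 = acc ++ skip_header_alt lines := by
  induction lines with
  | nil => intro acc; simp [skip_header_alt]
  | cons l rest ih =>
    intro acc
    by_cases h : PySem.List.pyGet? l.toList 0 = some '0'
    · simp [skipStep, skip_header_alt, h, foldl_skipStep_true]
    · simp [skipStep, skip_header_alt, h, ih]

-- ===== VERDICT (by name: the statement is the Claim_ definition above) =====
theorem skip_header_spec : Claim_equal_skip_header := by
  intro lines _ _
  unfold Spec_skip_header skip_header
  simpa using foldl_skipStep_false lines []
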